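-- pv_equiv track=rewrite | github.com/richard018/GQS2022 | questao_01.py | reposicao
-- ===== SOURCE A (Python) =====
-- def reposicao(item_quantidade):
--
--     if(len(item_quantidade) == 0):
--         return 0
--     resultado = 0
--     estocar = item_quantidade[0][1]
--     for elem in item_quantidade:
--         if(elem[1] < estocar):
--             estocar = elem[1]
--             resultado += 1
--     return resultado
-- ===== SOURCE B (Python) =====
-- def reposicao(item_quantidade):
--     # Build the running-minimum table, then count its distinct values:
--     # the number of strict drops equals distinct running minima minus one.
--     if not item_quantidade:
--         return 0
--     mins = []
--     m = item_quantidade[0][1]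
--     for _, q in item_quantidade:
--         m = min(m, q)
--         mins.append(m)
--     return len(set(mins)) - 1
-- ===== Notes on version B (the rewrite author's own statement) =====
-- stated objective: alternative
-- what changed: Replaces A's compare-and-update drop counter with a two-phase computation: build the prefix running-minimum table, then return the number of distinct values in it minus one (distinct running minima = drops + 1).
import Mathlib
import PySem

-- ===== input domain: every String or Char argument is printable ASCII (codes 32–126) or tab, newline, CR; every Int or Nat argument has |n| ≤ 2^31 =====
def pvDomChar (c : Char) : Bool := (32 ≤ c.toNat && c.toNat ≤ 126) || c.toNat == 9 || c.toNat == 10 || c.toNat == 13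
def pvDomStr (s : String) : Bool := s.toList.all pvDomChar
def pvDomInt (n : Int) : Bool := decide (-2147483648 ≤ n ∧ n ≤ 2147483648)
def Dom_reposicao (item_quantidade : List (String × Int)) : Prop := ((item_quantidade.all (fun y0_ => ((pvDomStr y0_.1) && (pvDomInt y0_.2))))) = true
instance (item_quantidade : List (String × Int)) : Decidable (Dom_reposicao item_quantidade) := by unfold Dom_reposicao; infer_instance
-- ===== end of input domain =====

-- ===== PORT A =====
-- A: single pass keeping (resultado, estocar); count each element strictly below the running minimum.
def reposicao (item_quantidade : List (String × Int)) : Int :=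
  match item_quantidade with
  | [] => 0
  | x :: _ =>
    (item_quantidade.foldl
      (fun (st : Int × Int) elem =>
        if elem.2 < st.2 then (st.1 + 1, elem.2) else st)
      (0, x.2)).1

-- ===== PORT B =====
-- B: build the prefix running-minimum table, then count its distinct values minus one.
def pvRunMins (m : Int) : List Int → List Int
  | [] => []
  | q :: qs => let m' := min m q; m' :: pvRunMins m' qs

def reposicao_alt (item_quantidade : List (String × Int)) : Int :=
  match item_quantidade with
  | [] => 0
  | x :: _ =>
    ((PySem.Set.ofList (pvRunMins x.2 (item_quantidade.map Prod.snd))).length : Int) - 1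

-- ===== PRECONDITION & SPEC =====
def Spec_reposicao (item_quantidade : List (String × Int)) (out : Int) : Prop := out = reposicao_alt item_quantidade
instance (item_quantidade : List (String × Int)) (out : Int) : Decidable (Spec_reposicao item_quantidade out) := by unfold Spec_reposicao; infer_instance

-- ===== CLAIM (what is proved, stated in full; the proofs are below) =====
def Claim_equal_reposicao : Prop := ∀ (item_quantidade : List (String × Int)), Dom_reposicao item_quantidade → Spec_reposicao item_quantidade (reposicao item_quantidade)

-- ===== LEMMAS AND PROOFS =====

theorem pvRunMins_le (l : List Int) : ∀ (m : Int) (a : Int), a ∈ pvRunMins m l → a ≤ m := by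
  induction l with
  | nil => intro m a h; simp [pvRunMins] at h
  | cons q qs ih =>
    intro m a h
    simp only [pvRunMins, List.mem_cons] at h
    rcases h with h | h
    · subst h; exact min_le_left _ _
    · exact le_trans (ih _ _ h) (min_le_left _ _)

-- the number of elements the Set-building fold adds depends only on membership in the accumulator
theorem pvFoldl_add_len (l : List Int) : ∀ (s t : List Int),
    (∀ x ∈ l, (x ∈ s ↔ x ∈ t)) →
    (l.foldl PySem.Set.add s).length + t.length = (l.foldl PySem.Set.add t).length + s.length := by
  induction l with
  | nil => intro s t _; simp; omega
  | cons x l ih =>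
    intro s t hmem
    have hx : (x ∈ s ↔ x ∈ t) := hmem x List.mem_cons_self
    have hc : PySem.Set.contains s x = PySem.Set.contains t x := by
      by_cases h : x ∈ s
      · rw [(PySem.Set.contains_iff s x).mpr h, ((PySem.Set.contains_iff t x).mpr (hx.mp h)).symm]
      · have h' : x ∉ t := fun ht => h (hx.mpr ht)
        have hs : PySem.Set.contains s x = false := by
          cases hcs : PySem.Set.contains s x
          · rfl
          · exact absurd ((PySem.Set.contains_iff s x).mp hcs) h
        have ht2 : PySem.Set.contains t x = false := by
          cases hct : PySem.Set.contains t x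
          · rfl
          · exact absurd ((PySem.Set.contains_iff t x).mp hct) h'
        rw [hs, ht2]
    simp only [List.foldl_cons, PySem.Set.add, hc]
    by_cases h : PySem.Set.contains t x = true
    · rw [if_pos h, if_pos h]
      exact ih s t (fun y hy => hmem y (List.mem_cons_of_mem _ hy))
    · rw [if_neg h, if_neg h]
      have := ih (s ++ [x]) (t ++ [x]) (fun y hy => by
        simp only [List.mem_append, List.mem_singleton]
        exact or_congr (hmem y (List.mem_cons_of_mem _ hy)) Iff.rfl)
      simp only [List.length_append, List.length_singleton] at this ⊢
      omega

theorem pvOfList_cons_not_mem (a : Int) (l : List Int) (h : a ∉ l) :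
    (PySem.Set.ofList (a :: l)).length = (PySem.Set.ofList l).length + 1 := by
  have key : (l.foldl PySem.Set.add [a]).length + ([] : List Int).length
       = (l.foldl PySem.Set.add []).length + [a].length := by
    refine pvFoldl_add_len l [a] [] (fun x hx => ?_)
    simp only [List.mem_singleton, List.not_mem_nil, iff_false]
    exact fun hxa => h (hxa ▸ hx)
  have h1 : PySem.Set.ofList (a :: l) = l.foldl PySem.Set.add [a] := by
    simp [PySem.Set.ofList, PySem.Set.empty, PySem.Set.add, List.foldl_cons]
  rw [h1]
  simp only [List.length_nil, List.length_singleton] at key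
  simpa [PySem.Set.ofList, PySem.Set.empty] using key

theorem pvOfList_cons_dup (a : Int) (l : List Int) :
    PySem.Set.ofList (a :: a :: l) = PySem.Set.ofList (a :: l) := by
  simp [PySem.Set.ofList, PySem.Set.empty, PySem.Set.add, List.foldl_cons]

theorem pvMain (xs : List (String × Int)) : ∀ (cnt m : Int),
    (xs.foldl (fun (st : Int × Int) elem =>
        if elem.2 < st.2 then (st.1 + 1, elem.2) else st) (cnt, m)).1
    = cnt + ((PySem.Set.ofList (m :: pvRunMins m (xs.map Prod.snd))).length : Int) - 1 := by
  induction xs with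
  | nil =>
    intro cnt m
    simp [pvRunMins, PySem.Set.ofList, PySem.Set.empty, PySem.Set.add]
  | cons x xs ih =>
    intro cnt m
    simp only [List.foldl_cons, List.map_cons, pvRunMins]
    by_cases h : x.2 < m
    · rw [if_pos h]
      have hmin : min m x.2 = x.2 := min_eq_right (le_of_lt h)
      rw [hmin]
      have hnm : m ∉ (x.2 :: pvRunMins x.2 (xs.map Prod.snd)) := by
        intro hm
        rcases List.mem_cons.mp hm with h1 | h1
        · exact absurd (h1 ▸ h) (lt_irrefl _)
        · have := pvRunMins_le _ _ _ h1
          omega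
      rw [ih (cnt + 1) x.2, pvOfList_cons_not_mem m _ hnm]
      push_cast
      ring
    · rw [if_neg h]
      have hmin : min m x.2 = m := min_eq_left (le_of_not_gt h)
      rw [hmin, ih cnt m, pvOfList_cons_dup]

-- ===== VERDICT (by name: the statement is the Claim_ definition above) =====
theorem reposicao_spec : Claim_equal_reposicao := by
  intro xs _
  unfold Spec_reposicao
  cases xs with
  | nil => rfl
  | cons x rest =>
    simp only [reposicao, reposicao_alt]
    rw [pvMain (x :: rest) 0 x.2]
    simp only [List.map_cons, pvRunMins, min_self]
    rw [pvOfList_cons_dup]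
    ring
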